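-- pv_equiv track=rewrite | github.com/chiamin/UnitenDMRG | tests/mps/test_qn_random_mps.py | _brute_allowed_prefix_charges
-- ===== SOURCE A (Python) =====
-- import itertools
--
-- def _brute_allowed_prefix_charges(site_index: int, num_sites: int, n_up_total: int) -> set[int]:
--     """Reference: enumerate all length-``num_sites`` bit strings with ``n_up_total`` ones."""
--     out: set[int] = set()
--     for bits in itertools.product([0, 1], repeat=num_sites):
--         if sum(bits) != n_up_total:
--             continue
--         c = sum(bits[: site_index + 1])
--         out.add(c)
--     return out
-- ===== SOURCE B (Python) =====
-- def _brute_allowed_prefix_charges(site_index: int, num_sites: int, n_up_total: int) -> set[int]: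
--     """Closed form: the feasible prefix one-counts form one contiguous range.
--
--     With k = effective prefix length (Python-slice clamp of site_index+1 to
--     [0, num_sites]), a prefix count c is achievable iff the remaining
--     num_sites-k sites can absorb the rest: max(0, n_up_total-(num_sites-k))
--     <= c <= min(k, n_up_total)."""
--     stop = site_index + 1
--     k = min(stop, num_sites) if stop >= 0 else max(0, num_sites + stop)
--     if 0 <= n_up_total <= num_sites:
--         lo = max(0, n_up_total - (num_sites - k))
--         return set(range(lo, min(k, n_up_total) + 1))
--     return set()
-- ===== Notes on version B (the rewrite author's own statement) =====
-- stated objective: faster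
-- what changed: Replaced the enumeration of all 2^num_sites bit strings by the closed-form contiguous range [max(0, n_up_total-(num_sites-k)), min(k, n_up_total)] of feasible prefix one-counts, with k the slice-clamped prefix length; intended as faster (exponential to linear): the probe measured 12434x at n=16, the largest size A finished, and A timed out beyond.
import Mathlib
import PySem

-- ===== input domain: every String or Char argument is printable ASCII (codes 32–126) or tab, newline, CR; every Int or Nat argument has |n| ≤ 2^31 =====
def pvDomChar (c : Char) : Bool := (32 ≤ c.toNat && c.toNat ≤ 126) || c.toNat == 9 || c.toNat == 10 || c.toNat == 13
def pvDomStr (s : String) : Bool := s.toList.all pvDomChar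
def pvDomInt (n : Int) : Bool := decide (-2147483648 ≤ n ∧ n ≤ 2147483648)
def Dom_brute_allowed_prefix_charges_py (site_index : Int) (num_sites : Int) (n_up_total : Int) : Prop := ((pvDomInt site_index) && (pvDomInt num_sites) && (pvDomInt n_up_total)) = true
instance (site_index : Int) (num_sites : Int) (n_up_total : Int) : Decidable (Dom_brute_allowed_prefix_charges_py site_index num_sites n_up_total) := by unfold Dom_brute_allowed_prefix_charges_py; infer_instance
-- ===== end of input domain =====

-- B replaces A's enumeration of all 2^num_sites bit strings by the closed-form contiguous
-- range of feasible prefix one-counts (intended as faster; a timing run measured 12434x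
-- at n=16, the largest size A finished, and A timed out on larger inputs).

-- ===== PORT A =====
-- itertools.product([0, 1], repeat=n) in lexicographic order (first component varies slowest)
def pvProd01 : Nat → List (List Int)
  | 0 => [[]]
  | n + 1 => ((pvProd01 n).map (fun bs => (0 : Int) :: bs)) ++ ((pvProd01 n).map (fun bs => (1 : Int) :: bs))

def brute_allowed_prefix_charges_py (site_index : Int) (num_sites : Int) (n_up_total : Int) : List Int :=
  if num_sites < 0 then []  -- Python raises ValueError here; excluded by Pre_
  else
    (pvProd01 num_sites.toNat).foldl
      (fun out bits =>
        if bits.sum ≠ n_up_total then out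
        else PySem.Set.add out (PySem.List.slice bits none (some (site_index + 1))).sum)
      PySem.Set.empty

-- ===== PORT B =====
def brute_allowed_prefix_charges_py_alt (site_index : Int) (num_sites : Int) (n_up_total : Int) : List Int :=
  let stop := site_index + 1
  let k := if 0 ≤ stop then min stop num_sites else max 0 (num_sites + stop)
  if 0 ≤ n_up_total ∧ n_up_total ≤ num_sites then
    PySem.Set.ofList
      (PySem.List.pyRange (max 0 (n_up_total - (num_sites - k))) (min k n_up_total + 1) 1)
  else PySem.Set.empty

-- ===== PRECONDITION & SPEC =====
-- A raises ValueError (negative 'repeat' for itertools.product) when num_sites < 0.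
def Pre_brute_allowed_prefix_charges_py (site_index : Int) (num_sites : Int) (n_up_total : Int) : Prop :=
  0 ≤ num_sites
instance (site_index : Int) (num_sites : Int) (n_up_total : Int) : Decidable (Pre_brute_allowed_prefix_charges_py site_index num_sites n_up_total) := by unfold Pre_brute_allowed_prefix_charges_py; infer_instance

def pvWitness_brute_allowed_prefix_charges_py : Int × Int × Int := (1, 3, 2)

def Spec_brute_allowed_prefix_charges_py (site_index : Int) (num_sites : Int) (n_up_total : Int) (out : List Int) : Prop := out = brute_allowed_prefix_charges_py_alt site_index num_sites n_up_total
instance (site_index : Int) (num_sites : Int) (n_up_total : Int) (out : List Int) : Decidable (Spec_brute_allowed_prefix_charges_py site_index num_sites n_up_total out) := by unfold Spec_brute_allowed_prefix_charges_py; infer_instance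

-- ===== CLAIM (what is proved, stated in full; the proofs are below) =====
def Claim_equal_brute_allowed_prefix_charges_py : Prop := ∀ (site_index : Int) (num_sites : Int) (n_up_total : Int), Dom_brute_allowed_prefix_charges_py site_index num_sites n_up_total → Pre_brute_allowed_prefix_charges_py site_index num_sites n_up_total → Spec_brute_allowed_prefix_charges_py site_index num_sites n_up_total (brute_allowed_prefix_charges_py site_index num_sites n_up_total)

-- ===== LEMMAS AND PROOFS =====

def pvDD : List Int → List Int
  | [] => []
  | x :: xs => x :: (pvDD xs).filter (fun y => y ≠ x)

-- the list of prefix-charge values A collects, before dedup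
def pvVals (n k : Nat) (t : Int) : List Int :=
  ((pvProd01 n).filter (fun bs => bs.sum == t)).map (fun bs => (bs.take k).sum)

theorem pvUpdate_eq_dd (ys : List Int) : ∀ S : List Int,
    PySem.Set.update S ys = S ++ (pvDD ys).filter (fun y => ¬ S.elem y) := by
  induction ys with
  | nil => intro S; simp [PySem.Set.update, pvDD]
  | cons y ys ih =>
    intro S
    have h1 : PySem.Set.update S (y :: ys) = PySem.Set.update (PySem.Set.add S y) ys := by
      simp [PySem.Set.update]
    rw [h1, ih]
    by_cases hy : y ∈ S
    · have hadd : PySem.Set.add S y = S := by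
        simp [PySem.Set.add, PySem.Set.contains, hy]
      rw [hadd]
      congr 1
      simp only [pvDD, List.filter_cons, List.filter_filter]
      have hyf : (decide ¬ S.elem y = true) = false := by simp [hy]
      rw [hyf]
      simp only [Bool.false_eq_true, if_false]
      apply List.filter_congr
      intro a _
      by_cases ha : a ∈ S
      · simp [ha]
      · simp [ha]
        rintro rfl; exact ha hy
    · have hadd : PySem.Set.add S y = S ++ [y] := by
        simp [PySem.Set.add, PySem.Set.contains, hy]
      rw [hadd, List.append_assoc]
      congr 1
      simp only [pvDD, List.filter_cons, List.filter_filter]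
      have hyf : (decide ¬ S.elem y = true) = true := by simp [hy]
      rw [hyf]
      simp only [if_true, List.singleton_append]
      congr 1
      apply List.filter_congr
      intro a _
      by_cases ha : a ∈ S <;> by_cases hay : a = y <;> subst_vars <;> simp [ha] <;> simp_all

theorem pvOfList_eq_dd (ys : List Int) : PySem.Set.ofList ys = pvDD ys := by
  have := pvUpdate_eq_dd ys []
  simpa [PySem.Set.ofList, PySem.Set.update, PySem.Set.empty] using this

theorem pvDD_append (xs ys : List Int) :
    pvDD (xs ++ ys) = pvDD xs ++ (pvDD ys).filter (fun y => ¬ xs.elem y) := by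
  induction xs with
  | nil => simp [pvDD]
  | cons x xs ih =>
    simp only [List.cons_append, pvDD, ih, List.filter_append, List.filter_filter]
    congr 2
    apply List.filter_congr
    intro a _
    by_cases ha : a ∈ xs <;> by_cases hax : a = x <;> subst_vars <;> simp [ha]

theorem pvDD_map_add_one (xs : List Int) :
    pvDD (xs.map (fun x => 1 + x)) = (pvDD xs).map (fun x => 1 + x) := by
  induction xs with
  | nil => simp [pvDD]
  | cons x xs ih =>
    simp only [List.map_cons, pvDD, ih, List.filter_map]
    congr 2
    apply List.filter_congr
    intro a _
    simp only [Function.comp]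
    by_cases hax : a = x <;> simp [hax] <;> omega

theorem pvDD_nodup (xs : List Int) (h : xs.Nodup) : pvDD xs = xs := by
  induction xs with
  | nil => simp [pvDD]
  | cons x xs ih =>
    simp only [pvDD]
    rw [ih (List.Nodup.of_cons h)]
    rw [List.filter_eq_self.2]
    intro a ha
    simp only [decide_eq_true_eq]
    rintro rfl
    exact (List.nodup_cons.1 h).1 ha

theorem pvDD_mem (xs : List Int) (y : Int) : y ∈ pvDD xs ↔ y ∈ xs := by
  induction xs with
  | nil => simp [pvDD]
  | cons x xs ih =>
    simp only [pvDD, List.mem_cons, List.mem_filter, ih]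
    by_cases hy : y = x <;> simp [hy]

theorem pvDD_const_zero (l : List (List Int)) :
    pvDD (l.map (fun _ => (0 : Int))) = if l = [] then [] else [0] := by
  induction l with
  | nil => simp [pvDD]
  | cons x l ih =>
    simp only [List.map_cons, pvDD, ih]
    by_cases hl : l = [] <;> simp [hl]

theorem pvMap_one_pyRange (a b : Int) :
    (PySem.List.pyRange a b 1).map (fun x => 1 + x) = PySem.List.pyRange (a + 1) (b + 1) 1 := by
  rw [PySem.List.pyRange_one, PySem.List.pyRange_one, List.map_map]
  have h : b + 1 - (a + 1) = b - a := by ring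
  rw [h]
  apply List.map_congr_left
  intro x _
  simp [Function.comp]
  ring

theorem pvMem_prod01 (n : Nat) : ∀ bs ∈ pvProd01 n,
    bs.length = n ∧ 0 ≤ bs.sum ∧ bs.sum ≤ (n : Int) := by
  induction n with
  | zero => intro bs h; simp [pvProd01] at h; subst h; simp
  | succ n ih =>
    intro bs h
    simp only [pvProd01, List.mem_append, List.mem_map] at h
    rcases h with ⟨cs, hc, rfl⟩ | ⟨cs, hc, rfl⟩ <;>
      obtain ⟨h1, h2, h3⟩ := ih cs hc <;> simp [h1] <;> push_cast <;> omega

theorem pvProd01_exists (n : Nat) : ∀ t : Int, 0 ≤ t → t ≤ (n : Int) →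
    ∃ bs ∈ pvProd01 n, bs.sum = t := by
  induction n with
  | zero =>
    intro t h0 h1
    have ht : t = 0 := by simpa using (by omega : t = 0)
    exact ⟨[], by simp [pvProd01], by simp [ht]⟩
  | succ n ih =>
    intro t h0 h1
    by_cases ht : t ≤ (n : Int)
    · obtain ⟨bs, hm, hs⟩ := ih t h0 ht
      refine ⟨0 :: bs, ?_, by simp [hs]⟩
      unfold pvProd01
      exact List.mem_append_left _ (List.mem_map_of_mem hm)
    · obtain ⟨bs, hm, hs⟩ := ih (t - 1) (by omega) (by push_cast at h1 ⊢; omega)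
      refine ⟨1 :: bs, ?_, by simp [hs]⟩
      unfold pvProd01
      exact List.mem_append_right _ (List.mem_map_of_mem hm)

theorem pvVals_nil (n k : Nat) (t : Int) (h : t < 0 ∨ (n : Int) < t) : pvVals n k t = [] := by
  unfold pvVals
  rw [List.filter_eq_nil_iff.2, List.map_nil]
  intro bs hm
  obtain ⟨_, h2, h3⟩ := pvMem_prod01 n bs hm
  simp only [beq_iff_eq]
  omega

theorem pvVals_succ (n k : Nat) (t : Int) :
    pvVals (n + 1) (k + 1) t = pvVals n k t ++ (pvVals n k (t - 1)).map (fun x => 1 + x) := by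
  unfold pvVals
  simp only [pvProd01, List.filter_append, List.filter_map, List.map_append, List.map_map]
  congr 1
  · rw [List.filter_congr (q := fun bs => bs.sum == t) ?_]
    · apply List.map_congr_left
      intro bs _
      simp [Function.comp, List.take_succ_cons]
    · intro bs _
      simp [Function.comp]
  · rw [List.filter_congr (q := fun bs => bs.sum == t - 1) ?_]
    · apply List.map_congr_left
      intro bs _
      simp [Function.comp, List.take_succ_cons]
    · intro bs _
      simp [Function.comp]
      constructor <;> (intro h; omega)

theorem pvFilter_le_pyRange (a b c : Int) :
    (PySem.List.pyRange a b 1).filter (fun y => decide (c ≤ y)) = PySem.List.pyRange (max a c) b 1 := by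
  have H : ∀ (n : Nat) (a : Int), (b - a).toNat = n →
      (PySem.List.pyRange a b 1).filter (fun y => decide (c ≤ y)) = PySem.List.pyRange (max a c) b 1 := by
    intro n
    induction n with
    | zero =>
      intro a ha
      have hba : b ≤ a := by omega
      rw [PySem.List.pyRange_one_eq_nil hba, PySem.List.pyRange_one_eq_nil (by omega : b ≤ max a c)]
      simp
    | succ n ih =>
      intro a ha
      have hab : a < b := by omega
      rw [PySem.List.pyRange_one_cons hab]
      by_cases hc : c ≤ a
      · rw [List.filter_cons_of_pos (by simp [hc])]
        rw [ih (a + 1) (by omega)]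
        have h1 : max (a + 1) c = a + 1 := by omega
        have h2 : max a c = a := by omega
        rw [h1, h2, ← PySem.List.pyRange_one_cons hab]
      · rw [List.filter_cons_of_neg (by simp; omega)]
        rw [ih (a + 1) (by omega)]
        congr 1
        omega
  exact H _ a rfl

theorem pvFold_eq_update (t : Int) (f : List Int → Int) (xs : List (List Int)) :
    ∀ (S : PySem.Set Int),
      xs.foldl (fun out bits => if bits.sum ≠ t then out else PySem.Set.add out (f bits)) S
        = PySem.Set.update S ((xs.filter (fun bs => bs.sum == t)).map f) := by
  induction xs with
  | nil => intro S; simp [PySem.Set.update]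
  | cons bs xs ih =>
    intro S
    by_cases hb : bs.sum = t
    · simp only [List.foldl_cons, hb, ne_eq, not_true_eq_false, if_false, ih,
        List.filter_cons, beq_self_eq_true, if_true, List.map_cons]
      simp [PySem.Set.update]
    · simp only [List.foldl_cons, ne_eq, hb, not_false_eq_true, if_true, ih, List.filter_cons]
      have : (bs.sum == t) = false := by simp [hb]
      rw [this]
      simp

theorem pvSlice_to_take (m : Nat) (b : Int) (xs : List Int) (h : xs.length = m) :
    PySem.List.slice xs none (some b) = xs.take (PySem.List.clampIdx m b) := by
  subst h
  simp [PySem.List.slice]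

theorem pvKey (n : Nat) : ∀ (k : Nat) (t : Int), k ≤ n →
    pvDD (pvVals n k t) =
      if 0 ≤ t ∧ t ≤ (n : Int) then
        PySem.List.pyRange (max 0 (t - ((n : Int) - (k : Int)))) (min (k : Int) t + 1) 1
      else [] := by
  induction n with
  | zero =>
    intro k t hk
    have hk0 : k = 0 := by omega
    subst hk0
    by_cases ht : t = 0
    · subst ht; decide
    · rw [pvVals_nil 0 0 t (by push_cast; omega)]
      simp only [pvDD]
      rw [if_neg (by push_cast; omega)]
  | succ n ih =>
    intro k t hk
    cases k with
    | zero =>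
      have hvals : pvVals (n + 1) 0 t
          = ((pvProd01 (n + 1)).filter (fun bs => bs.sum == t)).map (fun _ => (0 : Int)) := by
        unfold pvVals
        apply List.map_congr_left
        intro bs _
        simp
      rw [hvals, pvDD_const_zero]
      by_cases hc : 0 ≤ t ∧ t ≤ ((n + 1 : Nat) : Int)
      · rw [if_pos hc, if_neg ?_]
        · have h1 : max 0 (t - (((n + 1 : Nat) : Int) - ((0 : Nat) : Int))) = 0 := by
            push_cast; push_cast at hc; omega
          have h2 : min ((0 : Nat) : Int) t + 1 = 0 + 1 := by push_cast; omega
          rw [h1, h2, PySem.List.pyRange_one_singleton]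
        · obtain ⟨bs, hm, hs⟩ := pvProd01_exists (n + 1) t hc.1 hc.2
          intro hnil
          have hmem : bs ∈ List.filter (fun bs => bs.sum == t) (pvProd01 (n + 1)) :=
            List.mem_filter.2 ⟨hm, by simp [hs]⟩
          rw [hnil] at hmem
          simp at hmem
      · rw [if_neg hc, if_pos ?_]
        apply List.filter_eq_nil_iff.2
        intro bs hm
        obtain ⟨_, h2, h3⟩ := pvMem_prod01 _ bs hm
        simp only [beq_iff_eq]
        push_cast at hc
        omega
    | succ k' =>
      have hk' : k' ≤ n := by omega
      rw [pvVals_succ n k' t, pvDD_append, pvDD_map_add_one]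
      have IH1 := ih k' t hk'
      have IH2 := ih k' (t - 1) hk'
      by_cases h0 : 0 ≤ t ∧ t ≤ ((n + 1 : Nat) : Int)
      case neg =>
        rw [pvVals_nil n k' t (by push_cast at h0 ⊢; omega),
            pvVals_nil n k' (t - 1) (by push_cast at h0 ⊢; omega)]
        simp only [pvDD, List.map_nil, List.filter_nil, List.nil_append]
        rw [if_neg h0]
      case pos =>
        rw [if_pos h0]
        by_cases ht0 : t = 0
        · subst ht0
          rw [pvVals_nil n k' (0 - 1) (by norm_num)]
          have hcpos : (0 : Int) ≤ 0 ∧ (0 : Int) ≤ (n : Int) := ⟨le_refl _, Int.natCast_nonneg n⟩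
          rw [IH1, if_pos hcpos]
          simp only [pvDD, List.map_nil, List.filter_nil, List.append_nil]
          push_cast
          congr 2 <;> omega
        · by_cases htn : t ≤ (n : Int)
          · -- main merge case: 1 ≤ t ≤ n, both halves nonempty ranges
            rw [IH2, if_pos (by push_cast at h0 ⊢; omega), pvMap_one_pyRange]
            rw [List.filter_congr (q := fun y => decide ((min (k' : Int) t + 1) ≤ y)) ?_]
            · rw [pvFilter_le_pyRange, IH1, if_pos ⟨h0.1, htn⟩]
              have hmax : max (max 0 (t - 1 - ((n : Int) - (k' : Int))) + 1) (min (k' : Int) t + 1)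
                  = min (k' : Int) t + 1 := by omega
              rw [hmax]
              rw [← PySem.List.pyRange_one_append (max 0 (t - ((n : Int) - (k' : Int))))
                    (min (k' : Int) t + 1) (min (k' : Int) (t - 1) + 1 + 1)
                    (by omega) (by omega)]
              push_cast
              congr 2 <;> omega
            · intro y hy
              rw [PySem.List.mem_pyRange_one] at hy
              by_cases hin : y ∈ pvVals n k' t
              · have hdd : y ∈ pvDD (pvVals n k' t) := (pvDD_mem _ _).2 hin
                rw [IH1, if_pos ⟨h0.1, htn⟩, PySem.List.mem_pyRange_one] at hdd
                have hlt : ¬ (min ((k' : Int)) t + 1 ≤ y) := by omega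
                simp [hin, hlt]
              · have hdd : y ∉ pvDD (pvVals n k' t) := fun h => hin ((pvDD_mem _ _).1 h)
                rw [IH1, if_pos ⟨h0.1, htn⟩, PySem.List.mem_pyRange_one] at hdd
                have hge : min ((k' : Int)) t + 1 ≤ y := by
                  rcases not_and_or.1 hdd with h | h <;> omega
                simp [hin, hge]
          · -- t = n + 1: only the shifted half survives
            have htn1 : t = (n : Int) + 1 := by push_cast at h0 ⊢; omega
            rw [pvVals_nil n k' t (by omega)]
            rw [IH2, if_pos (by push_cast; omega), pvMap_one_pyRange]
            simp only [pvDD, List.nil_append]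
            rw [List.filter_eq_self.2 (by intro y hy; simp)]
            push_cast
            congr 2 <;> omega

-- ===== VERDICT (by name: the statement is the Claim_ definition above) =====
theorem brute_allowed_prefix_charges_py_spec : Claim_equal_brute_allowed_prefix_charges_py := by
  intro si n t _ hPre
  unfold Pre_brute_allowed_prefix_charges_py at hPre
  unfold Spec_brute_allowed_prefix_charges_py
  unfold brute_allowed_prefix_charges_py brute_allowed_prefix_charges_py_alt
  rw [if_neg (by omega)]
  have hnm : ((n.toNat : Nat) : Int) = n := Int.toNat_of_nonneg hPre
  rw [pvFold_eq_update t (fun bits => (PySem.List.slice bits none (some (si + 1))).sum)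
        (pvProd01 n.toNat) PySem.Set.empty]
  have hupd : ∀ L : List Int, PySem.Set.update PySem.Set.empty L = pvDD L := by
    intro L
    rw [pvUpdate_eq_dd]
    simp [PySem.Set.empty]
  rw [hupd]
  have hconv : ((pvProd01 n.toNat).filter (fun bs => bs.sum == t)).map
        (fun bits => (PySem.List.slice bits none (some (si + 1))).sum)
      = pvVals n.toNat (PySem.List.clampIdx n.toNat (si + 1)) t := by
    unfold pvVals
    apply List.map_congr_left
    intro bs hb
    rw [pvSlice_to_take n.toNat (si + 1) bs (pvMem_prod01 n.toNat bs (List.mem_filter.1 hb).1).1]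
  rw [hconv]
  rw [pvKey n.toNat (PySem.List.clampIdx n.toNat (si + 1)) t (PySem.List.clampIdx_le _ _)]
  have hkB : ((PySem.List.clampIdx n.toNat (si + 1) : Nat) : Int)
      = (if 0 ≤ si + 1 then min (si + 1) n else max 0 (n + (si + 1))) := by
    simp only [PySem.List.clampIdx]
    split_ifs <;> omega
  rw [hnm, hkB]
  dsimp only
  rw [pvOfList_eq_dd, pvDD_nodup _ (PySem.List.nodup_pyRange_one _ _)]
  rfl
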